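-- pv_equiv track=rewrite | github.com/AnonymousGroup4R/cllm4review | datasets/STD/functions/nn_add_prev_to_cur.py | add_previous_to_current
-- ===== SOURCE A (Python) =====
-- def add_previous_to_current(input_seq):
--     # Initialize an empty list for the output sequence
--     output_seq = []
--
--     # Iterate through the input sequence
--     for i in range(len(input_seq)):
--         # Add the current element to the previous element (if exists)
--         if i == 0:
--             output_seq.append(input_seq[i])
--         else:
--             output_seq.append(input_seq[i] + input_seq[i-1])
--
--     return output_seq
-- ===== SOURCE B (Python) =====
-- def add_previous_to_current(input_seq):
--     # Divide and conquer: adjacent sums of each half computed independently;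
--     # the right half is sliced starting one element early so its recursion
--     # sees the needed predecessor, and its first (duplicate) entry is dropped.
--     if len(input_seq) <= 1:
--         return list(input_seq)
--     if len(input_seq) == 2:
--         return [input_seq[0], input_seq[0] + input_seq[1]]
--     mid = (len(input_seq) + 1) // 2
--     return add_previous_to_current(input_seq[:mid]) + add_previous_to_current(input_seq[mid - 1:])[1:]
-- ===== Notes on version B (the rewrite author's own statement) =====
-- stated objective: alternative
-- what changed: Replaced the single indexed pass with a divide-and-conquer recursion: adjacent sums of the two halves are computed independently (the right half sliced one element early to carry the predecessor) and concatenated.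
import Mathlib
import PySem

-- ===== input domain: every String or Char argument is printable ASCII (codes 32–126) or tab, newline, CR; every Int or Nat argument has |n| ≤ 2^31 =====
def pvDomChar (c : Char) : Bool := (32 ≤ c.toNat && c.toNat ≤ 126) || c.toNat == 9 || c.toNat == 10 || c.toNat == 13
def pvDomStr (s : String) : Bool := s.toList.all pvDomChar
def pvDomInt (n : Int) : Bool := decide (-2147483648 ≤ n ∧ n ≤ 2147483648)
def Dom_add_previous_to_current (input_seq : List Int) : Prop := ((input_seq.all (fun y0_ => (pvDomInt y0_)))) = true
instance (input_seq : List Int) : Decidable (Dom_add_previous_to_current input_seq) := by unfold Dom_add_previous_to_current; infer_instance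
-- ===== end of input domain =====

-- B replaces A's single indexed pass by a divide-and-conquer recursion on halves
-- (right half sliced one element early to carry the predecessor) — alternative, same result.

-- ===== PORT A =====
-- literal port of A's loop: for i in range(len(input_seq)): append head or pairwise sum
def add_previous_to_current (input_seq : List Int) : List Int :=
  (PySem.List.pyRange 0 (input_seq.length) 1).foldl
    (fun output_seq i =>
      if i == 0 then
        output_seq ++ [PySem.List.pyGetD input_seq i 0]
      else
        output_seq ++ [PySem.List.pyGetD input_seq i 0 + PySem.List.pyGetD input_seq (i - 1) 0])
    []

-- ===== PORT B =====
-- literal port of B's divide-and-conquer recursion.  The slices are exact here: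
-- input_seq[:mid] with 0 ≤ mid ≤ len is List.take mid, input_seq[mid-1:] is
-- List.drop (mid-1), and [1:] is List.drop 1; input_seq[0]/input_seq[1] are
-- in-range (len = 2), so they are List.getD; list(input_seq) is the list itself;
-- (len(input_seq) + 1) // 2 on nonnegative ints is exactly Nat division / 2.
def add_previous_to_current_alt (input_seq : List Int) : List Int :=
  if input_seq.length ≤ 1 then
    input_seq
  else if input_seq.length = 2 then
    [input_seq.getD 0 0, input_seq.getD 0 0 + input_seq.getD 1 0]
  else
    let mid := (input_seq.length + 1) / 2
    add_previous_to_current_alt (input_seq.take mid) ++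
      (add_previous_to_current_alt (input_seq.drop (mid - 1))).drop 1
termination_by input_seq.length
decreasing_by
  · simp; omega
  · simp; omega

-- ===== PRECONDITION & SPEC =====
def Spec_add_previous_to_current (input_seq : List Int) (out : List Int) : Prop := out = add_previous_to_current_alt input_seq
instance (input_seq : List Int) (out : List Int) : Decidable (Spec_add_previous_to_current input_seq out) := by unfold Spec_add_previous_to_current; infer_instance

-- ===== CLAIM (what is proved, stated in full; the proofs are below) =====
def Claim_equal_add_previous_to_current : Prop := ∀ (input_seq : List Int), Dom_add_previous_to_current input_seq → Spec_add_previous_to_current input_seq (add_previous_to_current input_seq)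

-- ===== LEMMAS AND PROOFS =====

-- A's loop as a map over the index range
theorem add_prev_as_map (xs : List Int) :
    add_previous_to_current xs =
      (PySem.List.pyRange 0 (xs.length) 1).map
        (fun i => if i == 0 then PySem.List.pyGetD xs i 0
                  else PySem.List.pyGetD xs i 0 + PySem.List.pyGetD xs (i - 1) 0) := by
  unfold add_previous_to_current
  have hf : (fun (output_seq : List Int) (i : Int) =>
      if i == 0 then output_seq ++ [PySem.List.pyGetD xs i 0]
      else output_seq ++ [PySem.List.pyGetD xs i 0 + PySem.List.pyGetD xs (i - 1) 0])
      = (fun (output_seq : List Int) (i : Int) => output_seq ++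
          [if i == 0 then PySem.List.pyGetD xs i 0
           else PySem.List.pyGetD xs i 0 + PySem.List.pyGetD xs (i - 1) 0]) := by
    funext acc i
    by_cases h : i == 0 <;> simp [h]
  rw [hf, PySem.List.foldl_append_singleton_eq_map]
  simp

theorem alt_length (xs : List Int) :
    (add_previous_to_current_alt xs).length = xs.length := by
  fun_induction add_previous_to_current_alt xs with
  | case1 xs h => rfl
  | case2 xs h1 h2 => simp [h2]
  | case3 xs h1 h2 mid ih1 ih2 =>
    simp only [List.length_append, List.length_drop, ih1, ih2,
      List.length_take, List.length_drop]
    omega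

theorem alt_getElem? (xs : List Int) :
    ∀ i : Nat, i < xs.length →
      (add_previous_to_current_alt xs)[i]? =
        some (xs.getD i 0 + if i = 0 then 0 else xs.getD (i - 1) 0) := by
  fun_induction add_previous_to_current_alt xs with
  | case1 xs h =>
    intro i hi
    match xs, h with
    | [a], _ =>
      match i, hi with
      | 0, _ => simp [List.getD]
  | case2 xs h1 h2 =>
    intro i hi
    match xs, h2 with
    | [a, b], _ =>
      match i, hi with
      | 0, _ => simp [List.getD]
      | 1, _ => simp [List.getD]; ring
  | case3 xs h1 h2 m ih1 ih2 =>
    intro i hi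
    have hlen : 3 ≤ xs.length := by omega
    have hm : m = (xs.length + 1) / 2 := rfl
    have hm2 : 2 ≤ m := by omega
    have hmlt : m < xs.length := by omega
    have hL : (add_previous_to_current_alt (xs.take m)).length = m := by
      rw [alt_length]; simp; omega
    by_cases hcase : i < m
    · rw [List.getElem?_append_left (by omega)]
      rw [ih1 i (by simp; omega)]
      have e1 : (xs.take m).getD i 0 = xs.getD i 0 := by
        simp [List.getD_eq_getElem?_getD, List.getElem?_take_of_lt hcase]
      have e2 : (xs.take m).getD (i - 1) 0 = xs.getD (i - 1) 0 := by
        simp [List.getD_eq_getElem?_getD, List.getElem?_take_of_lt (show i - 1 < m by omega)]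
      rw [e1, e2]
    · rw [List.getElem?_append_right (by omega), hL]
      rw [List.getElem?_drop]
      have hk : 1 + (i - m) < (xs.drop (m - 1)).length := by simp; omega
      rw [ih2 _ hk]
      have e1 : (xs.drop (m - 1)).getD (1 + (i - m)) 0 = xs.getD i 0 := by
        simp only [List.getD_eq_getElem?_getD, List.getElem?_drop]
        rw [show m - 1 + (1 + (i - m)) = i by omega]
      have e2 : (xs.drop (m - 1)).getD (1 + (i - m) - 1) 0 = xs.getD (i - 1) 0 := by
        simp only [List.getD_eq_getElem?_getD, List.getElem?_drop]
        rw [show 1 + (i - m) - 1 = i - m by omega, show m - 1 + (i - m) = i - 1 by omega]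
      rw [e1, e2, if_neg (by omega : ¬ (1 + (i - m) = 0)), if_neg (by omega : ¬ i = 0)]

theorem add_previous_to_current_spec : Claim_equal_add_previous_to_current := by
  intro xs _
  unfold Spec_add_previous_to_current
  rw [add_prev_as_map]
  apply List.ext_getElem
  · rw [alt_length]; simp [PySem.List.length_pyRange_one]
  · intro k h1 h2
    rw [List.getElem_map, PySem.List.getElem_pyRange_one]
    have hk : k < xs.length := by
      simpa [PySem.List.length_pyRange_one] using h1
    have hB : (add_previous_to_current_alt xs)[k] =
        xs.getD k 0 + if k = 0 then 0 else xs.getD (k - 1) 0 := by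
      have := alt_getElem? xs k hk
      rw [List.getElem?_eq_getElem h2] at this
      exact Option.some.inj this
    rw [hB]
    by_cases hk0 : k = 0
    · subst hk0
      simp [PySem.List.pyGetD_ofNat', List.getD_eq_getElem?_getD]
    · rw [if_neg (by simp; omega), if_neg hk0]
      simp only [zero_add]
      rw [show ((k : Nat) : Int) - 1 = (((k - 1 : Nat)) : Int) by
            push_cast [Nat.cast_sub (by omega : 1 ≤ k)]; ring,
          PySem.List.pyGetD_natCast, PySem.List.pyGetD_natCast]
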